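-- pv_equiv track=rewrite | github.com/hmin0503/SWCodingTest | Archive/Programmers/pr3_origami.py | solution
-- ===== SOURCE A (Python) =====
-- def solution(n):
--     answer = [0]
--     if n == 1 :
--         return answer
--     else :
--         for _ in range(n-1):
--             answer = answer + [0] + [1-x for x in reversed(answer)]
--         return answer
-- ===== SOURCE B (Python) =====
-- def solution(n):
--     if n < 2:
--         return [0]
--     def f(i):
--         while i % 2 == 0:
--             i //= 2
--         return 0 if i % 4 == 1 else 1
--     return [f(i) for i in range(1, 2**n)]
-- ===== Notes on version B (the rewrite author's own statement) =====
-- stated objective: alternative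
-- what changed: B replaces A's recursive doubling (repeatedly appending a zero and the flipped reversal) by a single flat pass computing each crease from its position: strip trailing binary zeros and test the odd part mod 4.
import Mathlib
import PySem

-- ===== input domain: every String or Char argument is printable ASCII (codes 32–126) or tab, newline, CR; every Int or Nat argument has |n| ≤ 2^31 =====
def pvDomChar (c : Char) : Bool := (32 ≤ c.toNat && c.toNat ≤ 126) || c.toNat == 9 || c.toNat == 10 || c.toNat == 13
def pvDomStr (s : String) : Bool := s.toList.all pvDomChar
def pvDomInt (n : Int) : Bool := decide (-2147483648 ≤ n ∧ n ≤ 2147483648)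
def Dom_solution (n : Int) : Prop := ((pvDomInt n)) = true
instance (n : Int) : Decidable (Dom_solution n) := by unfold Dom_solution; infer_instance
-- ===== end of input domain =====

-- B computes each crease directly from its position's binary structure (strip trailing zeros,
-- test the odd part mod 4) in one flat pass, instead of A's recursive doubling; objective: alternative.

-- ===== PORT A =====
def solution (n : Int) : List Int :=
  let answer : List Int := [0]
  if n = 1 then answer
  else
    (PySem.List.pyRange 0 (n - 1) 1).foldl
      (fun answer _ => answer ++ [0] ++ (answer.reverse.map (fun x => 1 - x))) answer

-- ===== PORT B =====
-- Python's `while i % 2 == 0: i //= 2`: i comes from range(1, 2**n), so i ≥ 1; Nat-valued, exact there.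
def stripZeros (i : Nat) : Nat :=
  if i % 2 == 0 && i != 0 then stripZeros (i / 2) else i
decreasing_by simp_all; omega

def solution_alt (n : Int) : List Int :=
  if n < 2 then [0]
  else
    -- 2**n with n ≥ 2: Int power with Nat exponent n.toNat is exact
    (PySem.List.pyRange 1 (2 ^ n.toNat) 1).map
      (fun i => if stripZeros i.toNat % 4 = 1 then (0 : Int) else 1)

-- ===== PRECONDITION & SPEC =====
def Spec_solution (n : Int) (out : List Int) : Prop := out = solution_alt n
instance (n : Int) (out : List Int) : Decidable (Spec_solution n out) := by unfold Spec_solution; infer_instance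

-- ===== CLAIM (what is proved, stated in full; the proofs are below) =====
def Claim_equal_solution : Prop := ∀ (n : Int), Dom_solution n → Spec_solution n (solution n)

-- ===== LEMMAS AND PROOFS =====

-- proof-side abbreviations
def pvG (i : Nat) : Int := if stripZeros i % 4 = 1 then 0 else 1

def pvStep (a : List Int) : List Int := a ++ [0] ++ (a.reverse.map (fun x => 1 - x))

def pvL : Nat → List Int
  | 0 => [0]
  | k + 1 => pvStep (pvL k)

def pvIter : Nat → List Int → List Int
  | 0, a => a
  | m + 1, a => pvIter m (pvStep a)

theorem stripZeros_odd {i : Nat} (h : i % 2 = 1) : stripZeros i = i := by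
  unfold stripZeros; simp [h]

theorem stripZeros_double {m : Nat} (h : 0 < m) : stripZeros (2 * m) = stripZeros m := by
  conv_lhs => rw [stripZeros]
  simp [show (2 * m) % 2 = 0 by omega, show 2 * m ≠ 0 by omega,
    Nat.mul_div_cancel_left m (by norm_num : 0 < 2)]

theorem stripZeros_pow (t : Nat) : stripZeros (2 ^ t) = 1 := by
  induction t with
  | zero => simp [stripZeros]
  | succ t ih =>
    rw [pow_succ, mul_comm, stripZeros_double (Nat.two_pow_pos t)]
    exact ih

theorem pvG_pow (t : Nat) : pvG (2 ^ t) = 0 := by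
  simp [pvG, stripZeros_pow]

-- the flip law: the second half mirrors the first with 0/1 flipped
theorem pvG_flip : ∀ (t : Nat), ∀ (j : Nat), 1 ≤ j → j < 2 ^ t →
    pvG (2 ^ (t + 1) - j) = 1 - pvG j := by
  intro t
  induction t with
  | zero => intro j h1 h2; omega
  | succ t ih =>
    intro j h1 h2
    rcases Nat.even_or_odd j with he | ho
    · obtain ⟨j', rfl⟩ := he
      have hj' : 1 ≤ j' := by omega
      have hj'2 : j' < 2 ^ t := by
        have : 2 ^ (t + 1) = 2 * 2 ^ t := by ring
        omega
      have hsub : 2 ^ (t + 1 + 1) - (j' + j') = 2 * (2 ^ (t + 1) - j') := by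
        have : 2 ^ (t + 1 + 1) = 2 * 2 ^ (t + 1) := by ring
        omega
      have hpos : 0 < 2 ^ (t + 1) - j' := by
        have : j' < 2 ^ (t + 1) :=
          lt_of_lt_of_le hj'2 (Nat.pow_le_pow_right (by norm_num) (by omega))
        omega
      have hj2 : (j' + j') = 2 * j' := by ring
      rw [hsub, pvG, pvG, stripZeros_double hpos, hj2, stripZeros_double (by omega)]
      have := ih j' hj' hj'2
      rw [pvG, pvG] at this
      exact this
    · -- j odd: both sides are already odd, compare mod 4
      have hjo : j % 2 = 1 := Nat.odd_iff.mp ho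
      have h4dvd : 2 ^ (t + 1 + 1) % 4 = 0 := by
        have : 2 ^ (t + 1 + 1) = 4 * 2 ^ t := by ring
        omega
      have hlt : j < 2 ^ (t + 1 + 1) :=
        lt_of_lt_of_le h2 (Nat.pow_le_pow_right (by norm_num) (by omega))
      have hio : (2 ^ (t + 1 + 1) - j) % 2 = 1 := by omega
      rw [pvG, pvG, stripZeros_odd hjo, stripZeros_odd hio]
      rcases (by omega : j % 4 = 1 ∨ j % 4 = 3) with h | h
      · have hx : (2 ^ (t + 1 + 1) - j) % 4 = 3 := by omega
        simp [h, hx]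
      · have hx : (2 ^ (t + 1 + 1) - j) % 4 = 1 := by omega
        simp [h, hx]

-- A's iterated doubling produces exactly the map of pvG over positions 1 .. 2^(k+1)-1
theorem pvL_eq (k : Nat) : pvL k = (List.range' 1 (2 ^ (k + 1) - 1)).map pvG := by
  induction k with
  | zero => simp [pvL, List.range'_one, pvG, stripZeros]
  | succ k ih =>
    have h1 : 1 ≤ 2 ^ (k + 1) := Nat.one_le_two_pow
    have hsplit : (2 ^ (k + 1 + 1) - 1) = (2 ^ (k + 1) - 1) + 1 + (2 ^ (k + 1) - 1) := by
      have : 2 ^ (k + 1 + 1) = 2 * 2 ^ (k + 1) := by ring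
      omega
    have hr : List.range' 1 ((2 ^ (k + 1) - 1) + 1 + (2 ^ (k + 1) - 1))
        = List.range' 1 (2 ^ (k + 1) - 1) ++ [2 ^ (k + 1)]
          ++ List.range' (2 ^ (k + 1) + 1) (2 ^ (k + 1) - 1) := by
      rw [← List.range'_append (s := 1) (m := (2 ^ (k + 1) - 1) + 1) (n := 2 ^ (k + 1) - 1) (step := 1)]
      have e2 : 1 + 1 * ((2 ^ (k + 1) - 1) + 1) = 2 ^ (k + 1) + 1 := by omega
      rw [e2]
      rw [← List.range'_append (s := 1) (m := 2 ^ (k + 1) - 1) (n := 1) (step := 1)]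
      have e1 : 1 + 1 * (2 ^ (k + 1) - 1) = 2 ^ (k + 1) := by omega
      rw [e1, List.range'_one]
    rw [pvL, pvStep, ih, hsplit, hr]
    rw [List.map_append, List.map_append, List.map_singleton, pvG_pow]
    congr 1
    -- second halves agree, elementwise via the flip law
    apply List.ext_getElem
    · simp
    · intro p hp1 hp2
      simp only [List.length_map, List.length_range', List.length_reverse] at hp1
      simp only [List.getElem_map, List.getElem_range', List.getElem_reverse,
        List.length_map, List.length_range']
      have hflip := pvG_flip (k + 1) (2 ^ (k + 1) - 1 - p) (by omega) (by omega)
      have e3 : 2 ^ (k + 1 + 1) - (2 ^ (k + 1) - 1 - p) = 2 ^ (k + 1) + 1 + 1 * p := by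
        have : 2 ^ (k + 1 + 1) = 2 * 2 ^ (k + 1) := by ring
        omega
      rw [e3] at hflip
      rw [hflip]
      congr 2
      omega

-- the foldl over pyRange ignores the loop variable
theorem foldl_step (l : List Int) (a : List Int) :
    l.foldl (fun answer _ => answer ++ [0] ++ (answer.reverse.map (fun x => 1 - x))) a
      = pvIter l.length a := by
  induction l generalizing a with
  | nil => rfl
  | cons x xs ih =>
    rw [List.foldl_cons]
    exact ih (pvStep a)

theorem pvIter_step (m : Nat) (a : List Int) : pvIter m (pvStep a) = pvStep (pvIter m a) := by
  induction m generalizing a with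
  | zero => rfl
  | succ m ih => simp [pvIter, ih]

theorem pvIter_eq_pvL (m : Nat) : pvIter m [0] = pvL m := by
  induction m with
  | zero => rfl
  | succ m ih => rw [pvIter, pvIter_step, ih]; rfl

-- ===== VERDICT (by name: the statement is the Claim_ definition above) =====
theorem solution_spec : Claim_equal_solution := by
  intro n _
  unfold Spec_solution solution solution_alt
  by_cases h1 : n = 1
  · simp [h1]
  · simp only [h1, if_false]
    by_cases h2 : n < 2
    · -- n ≤ 0: the range 0 .. n-1 is empty, A returns [0]
      have he : PySem.List.pyRange 0 (n - 1) 1 = [] := by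
        rw [PySem.List.pyRange_one]
        have hz : (n - 1 - 0).toNat = 0 := by omega
        rw [hz]; rfl
      rw [he]
      simp [h2]
    · -- n ≥ 2
      simp only [h2, if_false]
      set k : Nat := (n - 1).toNat with hk
      have hn : n.toNat = k + 1 := by omega
      have hlen : (PySem.List.pyRange 0 (n - 1) 1).length = k := by
        rw [PySem.List.length_pyRange_one]; omega
      rw [foldl_step, hlen, pvIter_eq_pvL, pvL_eq, hn]
      rw [PySem.List.pyRange_one]
      have hcast : ((2 : Int) ^ (k + 1) - 1).toNat = 2 ^ (k + 1) - 1 := by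
        have : ((2 : Int) ^ (k + 1)) = ((2 ^ (k + 1) : Nat) : Int) := by push_cast; ring
        rw [this]
        have := Nat.one_le_two_pow (n := k + 1)
        omega
      rw [hcast, List.range'_eq_map_range, List.map_map, List.map_map]
      apply List.map_congr_left
      intro j hj
      simp only [Function.comp]
      have ht : ((1 : Int) + (j : Nat)).toNat = 1 + j := by omega
      simp [pvG, ht]
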